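-- pv_equiv track=rewrite | github.com/bijuthottathil/crewai-codeanalyzer | maingradio.py | create_code_summary
-- ===== SOURCE A (Python) =====
-- from typing import Dict, List
--
-- def create_code_summary(code_files: Dict[str, str], max_files: int = 20) -> str:
--     """Create detailed code summary."""
--     priority_extensions = ['.py', '.js', '.ts', '.jsx', '.tsx', '.java']
--     priority_names = ['main', 'app', 'server', 'index', 'config']
--
--     def get_priority(file_path: str) -> int:
--         score = 0
--         path_lower = file_path.lower()
--
--         for ext in priority_extensions:
--             if path_lower.endswith(ext):
--                 score += 10
--                 break
--
--         for name in priority_names: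
--             if name in path_lower:
--                 score += 5
--                 break
--
--         return score
--
--     sorted_files = sorted(code_files.items(), key=lambda x: get_priority(x[0]), reverse=True)
--     selected_files = sorted_files[:max_files]
--
--     summary_parts = []
--     for file_path, content in selected_files:
--         display_content = content[:3000]
--         if len(content) > 3000:
--             display_content += "\n... [truncated]"
--
--         summary_parts.append(f"""
-- {'='*70}
-- FILE: {file_path}
-- {'='*70}
-- {display_content}
-- """)
--
--     return "\n".join(summary_parts)
-- ===== SOURCE B (Python) =====
-- def create_code_summary(code_files, max_files=20):
--     """Create detailed code summary (single-pass bucket grouping instead of sorting)."""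
--     priority_extensions = ['.py', '.js', '.ts', '.jsx', '.tsx', '.java']
--     priority_names = ['main', 'app', 'server', 'index', 'config']
--
--     buckets = {15: [], 10: [], 5: [], 0: []}
--     for path, content in code_files.items():
--         p = path.lower()
--         score = (10 if any(p.endswith(e) for e in priority_extensions) else 0) \
--               + (5 if any(n in p for n in priority_names) else 0)
--         buckets[score].append((path, content))
--
--     selected = (buckets[15] + buckets[10] + buckets[5] + buckets[0])[:max_files]
--
--     parts = [
--         "\n{0}\nFILE: {1}\n{0}\n{2}\n".format(
--             '=' * 70,
--             path,
--             content[:3000] + ("\n... [truncated]" if len(content) > 3000 else ""),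
--         )
--         for path, content in selected
--     ]
--     return "\n".join(parts)
-- ===== Notes on version B (the rewrite author's own statement) =====
-- stated objective: alternative
-- what changed: Replaces the comparison sort with key=get_priority (and its per-path break-loops) by a single pass that drops each file into one of four score buckets (15/10/5/0) and concatenates the buckets in descending score order, which reproduces the stable reverse-sorted order.
import Mathlib
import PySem

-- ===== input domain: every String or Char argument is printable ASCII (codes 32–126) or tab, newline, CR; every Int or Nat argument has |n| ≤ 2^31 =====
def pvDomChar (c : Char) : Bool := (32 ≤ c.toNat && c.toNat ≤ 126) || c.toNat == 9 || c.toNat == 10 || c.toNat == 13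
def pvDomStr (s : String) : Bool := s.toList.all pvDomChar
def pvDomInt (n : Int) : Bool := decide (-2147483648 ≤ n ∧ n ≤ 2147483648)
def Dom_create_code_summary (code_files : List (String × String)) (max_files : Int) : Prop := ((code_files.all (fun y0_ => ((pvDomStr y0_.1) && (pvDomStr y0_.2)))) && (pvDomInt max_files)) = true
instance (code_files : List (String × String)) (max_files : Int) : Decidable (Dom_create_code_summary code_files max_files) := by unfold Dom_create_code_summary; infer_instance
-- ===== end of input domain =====

-- B replaces the sorted(..., key=get_priority, reverse=True) pass by a single-pass bucket
-- grouping over the four possible priority scores (alternative algorithm, same return value).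
-- A does not mutate its arguments; the equivalence is about the return value.

def pvEq70 : String := String.ofList (List.replicate 70 '=')

-- ===== PORT A =====
-- literal port of the 'for ext in priority_extensions: if path_lower.endswith(ext): score += 10; break' loop
def pvExtLoopA (pl : String) : List String → Int
  | [] => 0
  | e :: rest => if PySem.Str.endswith pl e then 10 else pvExtLoopA pl rest

-- literal port of the 'for name in priority_names: if name in path_lower: score += 5; break' loop
def pvNameLoopA (pl : String) : List String → Int
  | [] => 0
  | n :: rest => if PySem.Str.isIn n pl then 5 else pvNameLoopA pl rest

def pvGetPriority (file_path : String) : Int :=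
  let path_lower := PySem.Str.lower file_path
  pvExtLoopA path_lower [".py", ".js", ".ts", ".jsx", ".tsx", ".java"]
    + pvNameLoopA path_lower ["main", "app", "server", "index", "config"]

def create_code_summary (code_files : List (String × String)) (max_files : Int) : String :=
  let sorted_files := PySem.List.sorted code_files (fun x => pvGetPriority x.1) true
  let selected_files := PySem.List.slice sorted_files none (some max_files)
  let summary_parts := selected_files.foldl (fun acc fc =>
    let display_content := PySem.Str.slice fc.2 none (some 3000)
    let display_content :=
      if PySem.Str.len fc.2 > 3000 then display_content ++ "\n... [truncated]" else display_content
    acc ++ ["\n" ++ pvEq70 ++ "\nFILE: " ++ fc.1 ++ "\n" ++ pvEq70 ++ "\n" ++ display_content ++ "\n"]) []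
  PySem.Str.join "\n" summary_parts

-- ===== PORT B =====
def pvScoreB (path : String) : Int :=
  let p := PySem.Str.lower path
  (if [".py", ".js", ".ts", ".jsx", ".tsx", ".java"].any (fun e => PySem.Str.endswith p e) then 10 else 0)
    + (if ["main", "app", "server", "index", "config"].any (fun n => PySem.Str.isIn n p) then 5 else 0)

def create_code_summary_alt (code_files : List (String × String)) (max_files : Int) : String :=
  let buckets := code_files.foldl
    (fun (b : List (String × String) × List (String × String) × List (String × String) × List (String × String)) fc =>
      let s := pvScoreB fc.1
      if s = 15 then (b.1 ++ [fc], b.2.1, b.2.2.1, b.2.2.2)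
      else if s = 10 then (b.1, b.2.1 ++ [fc], b.2.2.1, b.2.2.2)
      else if s = 5 then (b.1, b.2.1, b.2.2.1 ++ [fc], b.2.2.2)
      else (b.1, b.2.1, b.2.2.1, b.2.2.2 ++ [fc]))
    ([], [], [], [])
  let selected := PySem.List.slice (buckets.1 ++ buckets.2.1 ++ buckets.2.2.1 ++ buckets.2.2.2) none (some max_files)
  let parts := selected.map (fun fc =>
    "\n" ++ pvEq70 ++ "\nFILE: " ++ fc.1 ++ "\n" ++ pvEq70 ++ "\n"
      ++ (PySem.Str.slice fc.2 none (some 3000)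
          ++ (if PySem.Str.len fc.2 > 3000 then "\n... [truncated]" else "")) ++ "\n")
  PySem.Str.join "\n" parts

-- ===== PRECONDITION & SPEC =====
def Spec_create_code_summary (code_files : List (String × String)) (max_files : Int) (out : String) : Prop := out = create_code_summary_alt code_files max_files
instance (code_files : List (String × String)) (max_files : Int) (out : String) : Decidable (Spec_create_code_summary code_files max_files out) := by unfold Spec_create_code_summary; infer_instance

-- ===== CLAIM (what is proved, stated in full; the proofs are below) =====
def Claim_equal_create_code_summary : Prop := ∀ (code_files : List (String × String)) (max_files : Int), Dom_create_code_summary code_files max_files → Spec_create_code_summary code_files max_files (create_code_summary code_files max_files)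

-- ===== LEMMAS AND PROOFS =====

theorem pvScore_eq (fp : String) : pvGetPriority fp = pvScoreB fp := by
  simp only [pvGetPriority, pvScoreB, pvExtLoopA, pvNameLoopA, List.any]
  split_ifs <;> simp_all

theorem pvScore_cases (fp : String) :
    pvScoreB fp = 15 ∨ pvScoreB fp = 10 ∨ pvScoreB fp = 5 ∨ pvScoreB fp = 0 := by
  simp only [pvScoreB]
  split_ifs <;> omega

theorem pvInsertBy_skip {α : Type} (before : α → α → Bool) (x : α) (hi lo : List α)
    (h : ∀ y ∈ hi, before x y = false) :
    PySem.List.insertBy before x (hi ++ lo) = hi ++ PySem.List.insertBy before x lo := by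
  induction hi with
  | nil => simp
  | cons y hs ih =>
    have hy : before x y = false := h y (by simp)
    simp [PySem.List.insertBy, hy, ih (fun z hz => h z (by simp [hz]))]

theorem pvInsertBy_head {α : Type} (before : α → α → Bool) (x : α) (lo : List α)
    (h : ∀ y ∈ lo, before x y = true) :
    PySem.List.insertBy before x lo = x :: lo := by
  cases lo with
  | nil => rfl
  | cons y t => simp [PySem.List.insertBy, h y (by simp)]

-- the stable reverse sort by a {15,10,5,0}-valued key is the concatenation of the four buckets
theorem pvFoldl_insertBy_buckets {α : Type} (g : α → Int)
    (hg : ∀ x, g x = 15 ∨ g x = 10 ∨ g x = 5 ∨ g x = 0) :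
    ∀ (xs b15 b10 b5 b0 : List α),
    (∀ y ∈ b15, g y = 15) → (∀ y ∈ b10, g y = 10) → (∀ y ∈ b5, g y = 5) → (∀ y ∈ b0, g y = 0) →
    xs.foldl (fun acc x => PySem.List.insertBy (fun a b => decide (g b < g a)) x acc)
      (b15 ++ b10 ++ b5 ++ b0)
      = (b15 ++ xs.filter (fun x => g x == 15)) ++ (b10 ++ xs.filter (fun x => g x == 10))
        ++ (b5 ++ xs.filter (fun x => g x == 5)) ++ (b0 ++ xs.filter (fun x => g x == 0)) := by
  intro xs
  induction xs with
  | nil => intro b15 b10 b5 b0 _ _ _ _; simp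
  | cons x xs ih =>
    intro b15 b10 b5 b0 h15 h10 h5 h0
    simp only [List.foldl_cons]
    rcases hg x with hx | hx | hx | hx
    · -- g x = 15: x goes to the end of b15
      have : PySem.List.insertBy (fun a b => decide (g b < g a)) x (b15 ++ b10 ++ b5 ++ b0)
          = (b15 ++ [x]) ++ b10 ++ b5 ++ b0 := by
        have h1 : ∀ y ∈ b15, (fun a b => decide (g b < g a)) x y = false := by
          intro y hy; simp [h15 y hy, hx]
        rw [show b15 ++ b10 ++ b5 ++ b0 = b15 ++ (b10 ++ b5 ++ b0) by simp,
            pvInsertBy_skip _ _ _ _ h1,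
            pvInsertBy_head _ _ _ (by
              intro y hy
              simp only [List.mem_append] at hy
              rcases hy with (hy | hy) | hy
              · simp [h10 y hy, hx]
              · simp [h5 y hy, hx]
              · simp [h0 y hy, hx])]
        simp
      rw [this, ih (b15 ++ [x]) b10 b5 b0
            (by intro y hy; rcases List.mem_append.mp hy with hy | hy
                exacts [h15 y hy, by simp at hy; simpa [hy]]) h10 h5 h0]
      simp [hx]
    · -- g x = 10
      have : PySem.List.insertBy (fun a b => decide (g b < g a)) x (b15 ++ b10 ++ b5 ++ b0)
          = b15 ++ (b10 ++ [x]) ++ b5 ++ b0 := by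
        have h1 : ∀ y ∈ b15 ++ b10, (fun a b => decide (g b < g a)) x y = false := by
          intro y hy; rcases List.mem_append.mp hy with hy | hy
          · simp [h15 y hy, hx]
          · simp [h10 y hy, hx]
        rw [show b15 ++ b10 ++ b5 ++ b0 = (b15 ++ b10) ++ (b5 ++ b0) by simp,
            pvInsertBy_skip _ _ _ _ h1,
            pvInsertBy_head _ _ _ (by
              intro y hy
              rcases List.mem_append.mp hy with hy | hy
              · simp [h5 y hy, hx]
              · simp [h0 y hy, hx])]
        simp
      rw [this, ih b15 (b10 ++ [x]) b5 b0 h15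
            (by intro y hy; rcases List.mem_append.mp hy with hy | hy
                exacts [h10 y hy, by simp at hy; simpa [hy]]) h5 h0]
      simp [hx]
    · -- g x = 5
      have : PySem.List.insertBy (fun a b => decide (g b < g a)) x (b15 ++ b10 ++ b5 ++ b0)
          = b15 ++ b10 ++ (b5 ++ [x]) ++ b0 := by
        have h1 : ∀ y ∈ (b15 ++ b10) ++ b5, (fun a b => decide (g b < g a)) x y = false := by
          intro y hy; rcases List.mem_append.mp hy with hy | hy
          · rcases List.mem_append.mp hy with hy | hy
            · simp [h15 y hy, hx]
            · simp [h10 y hy, hx]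
          · simp [h5 y hy, hx]
        rw [show b15 ++ b10 ++ b5 ++ b0 = ((b15 ++ b10) ++ b5) ++ b0 by simp,
            pvInsertBy_skip _ _ _ _ h1,
            pvInsertBy_head _ _ _ (by intro y hy; simp [h0 y hy, hx])]
        simp
      rw [this, ih b15 b10 (b5 ++ [x]) b0 h15 h10
            (by intro y hy; rcases List.mem_append.mp hy with hy | hy
                exacts [h5 y hy, by simp at hy; simpa [hy]]) h0]
      simp [hx]
    · -- g x = 0: x goes to the very end
      have : PySem.List.insertBy (fun a b => decide (g b < g a)) x (b15 ++ b10 ++ b5 ++ b0)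
          = b15 ++ b10 ++ b5 ++ (b0 ++ [x]) := by
        rw [PySem.List.insertBy_of_forall_not_before _ _ _ (by
              intro y hy
              simp only [List.append_assoc, List.mem_append] at hy
              rcases hy with hy | hy | hy | hy
              · simp [h15 y hy, hx]
              · simp [h10 y hy, hx]
              · simp [h5 y hy, hx]
              · simp [h0 y hy, hx])]
        simp
      rw [this, ih b15 b10 b5 (b0 ++ [x]) h15 h10 h5
            (by intro y hy; rcases List.mem_append.mp hy with hy | hy
                exacts [h0 y hy, by simp at hy; simpa [hy]])]
      simp [hx]

-- B's bucket fold computes exactly the four score filters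
theorem pvBucketFold (xs : List (String × String)) :
    ∀ (a b c d : List (String × String)),
    xs.foldl
      (fun (bk : List (String × String) × List (String × String) × List (String × String) × List (String × String)) fc =>
        if pvScoreB fc.1 = 15 then (bk.1 ++ [fc], bk.2.1, bk.2.2.1, bk.2.2.2)
        else if pvScoreB fc.1 = 10 then (bk.1, bk.2.1 ++ [fc], bk.2.2.1, bk.2.2.2)
        else if pvScoreB fc.1 = 5 then (bk.1, bk.2.1, bk.2.2.1 ++ [fc], bk.2.2.2)
        else (bk.1, bk.2.1, bk.2.2.1, bk.2.2.2 ++ [fc]))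
      (a, b, c, d)
      = (a ++ xs.filter (fun x => pvScoreB x.1 == 15), b ++ xs.filter (fun x => pvScoreB x.1 == 10),
         c ++ xs.filter (fun x => pvScoreB x.1 == 5), d ++ xs.filter (fun x => pvScoreB x.1 == 0)) := by
  induction xs with
  | nil => intro a b c d; simp
  | cons x xs ih =>
    intro a b c d
    simp only [List.foldl_cons]
    rcases pvScore_cases x.1 with hx | hx | hx | hx <;>
      simp [hx, ih, List.append_assoc]

-- ===== VERDICT (by name: the statement is the Claim_ definition above) =====
theorem create_code_summary_spec : Claim_equal_create_code_summary := by
  intro code_files max_files _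
  simp only [Spec_create_code_summary, create_code_summary, create_code_summary_alt]
  rw [pvBucketFold]
  rw [PySem.List.sorted_rev_eq_foldl_insertBy]
  simp only [pvScore_eq]
  have hA := pvFoldl_insertBy_buckets (fun x : String × String => pvScoreB x.1)
      (fun x => pvScore_cases x.1) code_files [] [] [] []
      (by simp) (by simp) (by simp) (by simp)
  simp only [List.nil_append, List.append_nil] at hA ⊢
  rw [hA, PySem.List.foldl_append_singleton_eq_map]
  simp only [List.nil_append]
  congr 1
  apply List.map_congr_left
  intro fc _
  split_ifs with h <;> simp
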